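-- pv_equiv track=rewrite | github.com/Xevion/the-office | server/normalization/helpers.py | marked_item_merge
-- ===== SOURCE A (Python) =====
-- from collections import OrderedDict
-- from typing import List, Optional, Tuple, Iterator
--
-- def marked_item_merge(keys: List[str], values: List[int]) -> Tuple[List[str], List[str]]:
--     """Add the values of identical keys together, then return both the keys and values"""
--     merge = OrderedDict()
--     for key, value in zip(keys, values):
--         # Already inserted, now make/keep it negative
--         if key in merge.keys():
--             # Keys that haven't been turned over need to be made negative
--             if merge[key] > 0:
--                 merge[key] = -merge[key]
--
--             # And then subtract the value in all cases
--             merge[key] -= value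
--         else:
--             # Values that are positive didn't merge with other counts.
--             merge[key] = value
--
--     keys, values = zip(*merge.items())
--     values = [f'{-value}*' if value < 0 else str(value) for value in values]
--     return keys, values
-- ===== SOURCE B (Python) =====
-- def marked_item_merge(keys, values):
--     """Group values by key in first-seen order, then reduce each group with the
--     sign-flip/subtract state machine; return value only (no shared mutation)."""
--     groups = {}
--     for key, value in zip(keys, values):
--         groups[key] = groups.get(key, []) + [value]
--
--     def reduce(vals):
--         m = vals[0]
--         for v in vals[1:]:
--             if m > 0:
--                 m = -m
--             m -= v
--         return m
--
--     merged = {key: reduce(vals) for key, vals in groups.items()}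
--     out_keys, out_values = zip(*merged.items())
--     out_values = [f'{-v}*' if v < 0 else str(v) for v in out_values]
--     return out_keys, out_values
-- ===== Notes on version B (the rewrite author's own statement) =====
-- stated objective: alternative
-- what changed: Replaces A's single interleaved dict-update pass with a two-phase structure: first group values by key in first-seen order, then reduce each group independently with the sign-flip/subtract fold before formatting.
import Mathlib
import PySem

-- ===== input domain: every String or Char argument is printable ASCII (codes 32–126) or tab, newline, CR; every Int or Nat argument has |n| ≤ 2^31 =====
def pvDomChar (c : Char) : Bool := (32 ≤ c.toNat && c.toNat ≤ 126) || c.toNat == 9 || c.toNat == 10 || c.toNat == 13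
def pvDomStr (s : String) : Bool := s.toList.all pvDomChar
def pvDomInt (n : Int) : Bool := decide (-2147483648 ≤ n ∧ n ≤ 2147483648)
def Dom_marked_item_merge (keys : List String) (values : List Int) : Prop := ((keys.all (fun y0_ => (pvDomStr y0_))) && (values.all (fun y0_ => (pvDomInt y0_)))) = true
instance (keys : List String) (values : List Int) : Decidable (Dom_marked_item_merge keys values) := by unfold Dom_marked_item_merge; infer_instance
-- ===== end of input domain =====

-- B re-implements A as group-by-key then per-group reduction (objective: alternative decomposition, same cost).

-- ===== PORT A =====
-- f'{-value}*' if value < 0 else str(value)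
def pvFmt (v : Int) : String := if v < 0 then PySem.Int.toStr (-v) ++ "*" else PySem.Int.toStr v

-- one iteration of A's loop body
def pvAStep (d : PySem.Dict String Int) (kv : String × Int) : PySem.Dict String Int :=
  match d.get? kv.1 with
  | some m => d.insert kv.1 ((if m > 0 then -m else m) - kv.2)
  | none => d.insert kv.1 kv.2

def marked_item_merge (keys : List String) (values : List Int) : List String × List String :=
  let merge := (keys.zip values).foldl pvAStep PySem.Dict.empty
  (merge.items.map (·.1), merge.items.map (fun p => pvFmt p.2))

-- ===== PORT B =====
-- groups[key] = groups.get(key, []) + [value]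
def pvBStep (g : PySem.Dict String (List Int)) (kv : String × Int) : PySem.Dict String (List Int) :=
  g.insert kv.1 (g.getD kv.1 [] ++ [kv.2])

-- B's reduce: m = vals[0]; for v in vals[1:]: if m > 0: m = -m; m -= v
-- (group lists are never empty; vals[0] on [] would be an IndexError, represented by the unreachable 0)
def pvReduce (vals : List Int) : Int :=
  match vals with
  | [] => 0
  | m :: rest => rest.foldl (fun m v => (if m > 0 then -m else m) - v) m

def marked_item_merge_alt (keys : List String) (values : List Int) : List String × List String :=
  let groups := (keys.zip values).foldl pvBStep PySem.Dict.empty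
  let merged := groups.items.map (fun p => (p.1, pvReduce p.2))
  (merged.map (·.1), merged.map (fun p => pvFmt p.2))

-- ===== PRECONDITION & SPEC =====
-- A raises ValueError (zip(*[]) unpacking) exactly when zip(keys, values) is empty; B raises there too.
def Pre_marked_item_merge (keys : List String) (values : List Int) : Prop := keys ≠ [] ∧ values ≠ []
instance (keys : List String) (values : List Int) : Decidable (Pre_marked_item_merge keys values) := by unfold Pre_marked_item_merge; infer_instance
def pvWitness_marked_item_merge : List String × List Int := (["a", "b", "a"], [3, -2, 5])

def Spec_marked_item_merge (keys : List String) (values : List Int) (out : List String × List String) : Prop := out = marked_item_merge_alt keys values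
instance (keys : List String) (values : List Int) (out : List String × List String) : Decidable (Spec_marked_item_merge keys values out) := by unfold Spec_marked_item_merge; infer_instance

-- ===== CLAIM (what is proved, stated in full; the proofs are below) =====
def Claim_equal_marked_item_merge : Prop := ∀ (keys : List String) (values : List Int), Dom_marked_item_merge keys values → Pre_marked_item_merge keys values → Spec_marked_item_merge keys values (marked_item_merge keys values)

-- ===== LEMMAS AND PROOFS =====

-- the reduction of a group extended on the right is A's update step (for nonempty groups)
theorem pvReduce_append (vs : List Int) (h : vs ≠ []) (v : Int) :
    pvReduce (vs ++ [v]) = (if pvReduce vs > 0 then -(pvReduce vs) else pvReduce vs) - v := by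
  match vs, h with
  | m :: rest, _ => simp [pvReduce, List.foldl_append]

-- lookups in the reduced image of a group dict
theorem get?_map_reduce (L : List (String × List Int)) (k : String) :
    (PySem.Dict.mk (L.map (fun p => (p.1, pvReduce p.2)))).get? k
      = ((PySem.Dict.mk L).get? k).map pvReduce := by
  induction L with
  | nil => simp [PySem.Dict.get?]
  | cons p rest ih =>
      simp only [List.map_cons, PySem.Dict.get?_mk_cons]
      split_ifs with hk
      · rw [PySem.Dict.get?_mk_cons]; simp [hk]
      · rw [PySem.Dict.get?_mk_cons]; simp [hk, ih]

-- groups produced by B's fold have nonempty value lists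
theorem pvBStep_nonempty (l : List (String × Int)) (g : PySem.Dict String (List Int))
    (h : ∀ p ∈ g.items, p.2 ≠ []) :
    ∀ p ∈ (l.foldl pvBStep g).items, p.2 ≠ [] := by
  induction l generalizing g with
  | nil => exact h
  | cons kv rest ih =>
      refine ih _ ?_
      intro p hp
      rcases (PySem.Dict.mem_items_insert _ _ _ _).1 hp with h1 | h2
      · subst h1; simp
      · exact h p h2.1

-- a successful first-match lookup returns a list stored in the dict
theorem get?_mem (L : List (String × List Int)) (k : String) (vs : List Int)
    (h : (PySem.Dict.mk L).get? k = some vs) : (k, vs) ∈ L := by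
  induction L with
  | nil => simp [PySem.Dict.get?] at h
  | cons p rest ih =>
      rw [PySem.Dict.get?_mk_cons] at h
      split_ifs at h with hk
      · cases h
        rw [show (k, p.2) = p from by rw [Prod.ext_iff]; exact ⟨(beq_iff_eq.mp hk).symm, rfl⟩]
        exact List.mem_cons_self
      · exact List.mem_cons_of_mem _ (ih h)

-- one step of A on the reduced image = the reduced image of one step of B
theorem step_comm (g : PySem.Dict String (List Int)) (kv : String × Int)
    (hne : ∀ p ∈ g.items, p.2 ≠ []) :
    pvAStep (PySem.Dict.mk (g.items.map (fun p => (p.1, pvReduce p.2)))) kv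
      = PySem.Dict.mk ((pvBStep g kv).items.map (fun p => (p.1, pvReduce p.2))) := by
  have hget : (PySem.Dict.mk (g.items.map (fun p => (p.1, pvReduce p.2)))).get? kv.1
      = (g.get? kv.1).map pvReduce := get?_map_reduce g.items kv.1
  have hcont : (PySem.Dict.mk (g.items.map (fun p => (p.1, pvReduce p.2)))).contains kv.1
      = g.contains kv.1 := by
    rw [PySem.Dict.contains_eq_isSome_get?, PySem.Dict.contains_eq_isSome_get?, hget]
    cases g.get? kv.1 <;> rfl
  apply PySem.Dict.ext
  cases hg : g.get? kv.1 with
  | none =>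
      have hc : g.contains kv.1 = false := by
        rw [PySem.Dict.contains_eq_isSome_get?, hg]; rfl
      unfold pvAStep pvBStep
      rw [hget, hg]
      simp only [Option.map_none]
      rw [PySem.Dict.items_insert_of_not_contains _ _ (by rw [hcont]; exact hc),
          PySem.Dict.getD_of_get?_eq_none _ _ hg,
          PySem.Dict.items_insert_of_not_contains _ _ hc]
      simp [pvReduce]
  | some vs =>
      have hvs : vs ≠ [] := hne (kv.1, vs) (get?_mem g.items kv.1 vs hg)
      have hc : g.contains kv.1 = true := by
        rw [PySem.Dict.contains_eq_isSome_get?, hg]; rfl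
      unfold pvAStep pvBStep
      rw [hget, hg]
      simp only [Option.map_some]
      rw [PySem.Dict.items_insert_of_contains _ _ (by rw [hcont]; exact hc),
          PySem.Dict.getD_of_get?_eq_some _ _ hg,
          PySem.Dict.items_insert_of_contains _ _ hc]
      simp only [List.map_map]
      apply List.map_congr_left
      intro p _
      by_cases hk : p.1 = kv.1
      · simp [Function.comp, hk, pvReduce_append vs hvs kv.2]
      · simp [Function.comp, hk]

-- the whole folds commute with the reduced image
theorem fold_comm (l : List (String × Int)) (g : PySem.Dict String (List Int))
    (hne : ∀ p ∈ g.items, p.2 ≠ []) :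
    l.foldl pvAStep (PySem.Dict.mk (g.items.map (fun p => (p.1, pvReduce p.2))))
      = PySem.Dict.mk ((l.foldl pvBStep g).items.map (fun p => (p.1, pvReduce p.2))) := by
  induction l generalizing g with
  | nil => rfl
  | cons kv rest ih =>
      simp only [List.foldl_cons, step_comm g kv hne]
      exact ih _ (pvBStep_nonempty [kv] g hne)

-- ===== VERDICT (by name: the statement is the Claim_ definition above) =====
theorem marked_item_merge_spec : Claim_equal_marked_item_merge := by
  intro keys values _ _
  unfold Spec_marked_item_merge marked_item_merge marked_item_merge_alt
  have h := fold_comm (keys.zip values) PySem.Dict.empty (by intro p hp; simp [PySem.Dict.empty] at hp)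
  have hempty : (PySem.Dict.mk (((PySem.Dict.empty : PySem.Dict String (List Int)).items).map (fun p => (p.1, pvReduce p.2)))) = (PySem.Dict.empty : PySem.Dict String Int) := by rfl
  rw [hempty] at h
  rw [h]
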